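-- pv_equiv track=rewrite | github.com/mcjcode/number-theory | bps.py | bps_w_sign
-- ===== SOURCE A (Python) =====
-- def bps_w_sign(xs,n):
--     """
--     For an increasing sequence xs of relatively
--     prime numbers and an upper bound n, compute
--     all of the products <=n of subsets of xs, along
--     with a parity: +1 if an even number of elements
--     are used, -1 if an odd number are used.
--     """
--     if len(xs)==0:
--         yield (1,1)
--         return
--
--     x, *xs = xs
--     for y in bps_w_sign(xs,n):
--         yield y
--     if x <= n:
--         for (s, pr) in bps_w_sign(xs,n//x):
--             yield -s, x*pr
-- ===== SOURCE B (Python) =====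
-- def bps_w_sign(xs, n):
--     # Iterative DFS with an explicit LIFO stack of frames
--     # (remaining elements, bound, accumulated sign, accumulated product).
--     stack = [(xs, n, 1, 1)]
--     while stack:
--         rem, bound, sign, prod = stack.pop()
--         if not rem:
--             yield (sign, prod)
--         else:
--             x = rem[0]
--             if x <= bound:
--                 stack.append((rem[1:], bound // x, -sign, x * prod))
--             stack.append((rem[1:], bound, sign, prod))
-- ===== Notes on version B (the rewrite author's own statement) =====
-- stated objective: alternative
-- what changed: Replaces A's recursive generator with an iterative DFS over an explicit LIFO stack of frames (remaining elements, bound, sign, product), pushing the include-branch before the exclude-branch so the emission order matches A exactly.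
-- outside the precondition, e.g. on bps_w_sign([-2, 0], -5): A returns [(1, 1)], B returns [(1, 1)]
import Mathlib
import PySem

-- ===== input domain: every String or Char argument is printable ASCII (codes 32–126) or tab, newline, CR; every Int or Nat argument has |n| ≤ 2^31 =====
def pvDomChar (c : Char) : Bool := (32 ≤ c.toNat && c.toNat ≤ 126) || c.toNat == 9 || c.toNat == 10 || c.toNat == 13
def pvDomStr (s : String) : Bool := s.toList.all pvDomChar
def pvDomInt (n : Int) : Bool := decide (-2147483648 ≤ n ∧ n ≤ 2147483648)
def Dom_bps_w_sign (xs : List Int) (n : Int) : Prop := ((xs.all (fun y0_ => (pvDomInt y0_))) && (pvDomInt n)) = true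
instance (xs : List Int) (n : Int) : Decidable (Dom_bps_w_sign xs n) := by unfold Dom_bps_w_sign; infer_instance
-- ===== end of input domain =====

-- B replaces A's recursive generator by an iterative DFS over an explicit LIFO stack of
-- frames (remaining elements, bound, sign, product); the claim is about the returned list.

-- ===== PORT A =====
-- literal port of A: recursion on the list, exclude-branch first, include-branch pruned by x ≤ n
def bps_w_sign (xs : List Int) (n : Int) : List (Int × Int) :=
  match xs with
  | [] => [(1, 1)]
  | x :: xs =>
    bps_w_sign xs n ++
      (if x ≤ n then
        (bps_w_sign xs (PySem.Int.floordiv n x)).map (fun sp => (-sp.1, x * sp.2))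
      else [])

-- ===== PORT B =====
-- the while loop over the stack (head = top of stack); pushing include before exclude
-- means the exclude frame is popped first, as in Source B
def bpsAltLoop (stack : List (List Int × Int × Int × Int)) : List (Int × Int) :=
  match stack with
  | [] => []
  | ([], _, sign, prod) :: rest => (sign, prod) :: bpsAltLoop rest
  | (x :: rem, bound, sign, prod) :: rest =>
    bpsAltLoop ((rem, bound, sign, prod) ::
      ((if x ≤ bound then [(rem, PySem.Int.floordiv bound x, -sign, x * prod)] else []) ++ rest))
termination_by (stack.map (fun f => 3 ^ f.1.length)).sum
decreasing_by
  · simp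
  · simp only [List.map_cons, List.sum_cons, List.map_append, List.sum_append]
    have h3 : 0 < 3 ^ rem.length := pow_pos (by norm_num : (0:ℕ) < 3) rem.length
    split_ifs <;> simp [pow_succ] <;> omega

def bps_w_sign_alt (xs : List Int) (n : Int) : List (Int × Int) :=
  bpsAltLoop [(xs, n, 1, 1)]

-- ===== PRECONDITION & SPEC =====
-- Pre_ excludes lists containing 0 (except in the safe case n < 0 with all elements nonnegative,
-- where no branch is ever taken): with 0 ∈ xs Python A can hit ZeroDivisionError; this is slightly
-- narrower than the exact (recursive) raise condition, e.g. xs=[-2,0], n=-5 is excluded yet returns.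
def Pre_bps_w_sign (xs : List Int) (n : Int) : Prop :=
  (0 : Int) ∉ xs ∨ (n < 0 ∧ ∀ x ∈ xs, 0 ≤ x)
instance (xs : List Int) (n : Int) : Decidable (Pre_bps_w_sign xs n) := by unfold Pre_bps_w_sign; infer_instance
def pvWitness_bps_w_sign : List Int × Int := ([2, 3], 10)

def Spec_bps_w_sign (xs : List Int) (n : Int) (out : List (Int × Int)) : Prop := out = bps_w_sign_alt xs n
instance (xs : List Int) (n : Int) (out : List (Int × Int)) : Decidable (Spec_bps_w_sign xs n out) := by unfold Spec_bps_w_sign; infer_instance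

-- ===== CLAIM (what is proved, stated in full; the proofs are below) =====
def Claim_equal_bps_w_sign : Prop := ∀ (xs : List Int) (n : Int), Dom_bps_w_sign xs n → Pre_bps_w_sign xs n → Spec_bps_w_sign xs n (bps_w_sign xs n)

-- ===== LEMMAS AND PROOFS =====

-- A frame (rem, bound, sign, prod) on the stack yields exactly A's output for (rem, bound),
-- transformed by the accumulated sign and product, followed by the rest of the stack.
theorem bpsAltLoop_frame (rem : List Int) (bound sign prod : Int)
    (rest : List (List Int × Int × Int × Int)) :
    bpsAltLoop ((rem, bound, sign, prod) :: rest) =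
      (bps_w_sign rem bound).map (fun sp => (sign * sp.1, prod * sp.2)) ++ bpsAltLoop rest := by
  induction rem generalizing bound sign prod rest with
  | nil => simp [bpsAltLoop, bps_w_sign]
  | cons x rem ih =>
    rw [bpsAltLoop]
    by_cases hx : x ≤ bound
    · simp only [hx, if_true, List.singleton_append]
      rw [ih, ih]
      simp only [bps_w_sign, hx, if_true, List.map_append, List.append_assoc, List.map_map]
      congr 2
      apply List.map_congr_left
      intro sp _
      simp only [Function.comp]
      refine Prod.ext ?_ ?_ <;> simp <;> ring
    · simp only [hx, if_false, List.nil_append]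
      rw [ih]
      simp [bps_w_sign, hx]

-- ===== VERDICT (by name: the statement is the Claim_ definition above) =====
theorem bps_w_sign_spec : Claim_equal_bps_w_sign := by
  intro xs n _ _
  unfold Spec_bps_w_sign bps_w_sign_alt
  rw [bpsAltLoop_frame]
  simp [bpsAltLoop]
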